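-- pv_equiv track=rewrite | github.com/shreyas-shrestha/Neuron | backend/app/interpretability/lending_probes.py | build_probe_texts
-- ===== SOURCE A (Python) =====
-- LOAN_TEMPLATE = (
--     "Loan application. Applicant name: {name}. "
--     "Annual income: $72,000. Credit score: 710. "
--     "Requested amount: $25,000 for debt consolidation. "
--     "Employment: software engineer, 4 years. Zip: 94107."
-- )
--
-- NAME_GROUPS: dict[str, list[str]] = {
--     "group_a": [
--         "Jamal Washington",
--         "Aaliyah Johnson",
--         "Darnell Brooks",
--         "Imani Carter",
--     ],
--     "group_b": [
--         "Emily Anderson",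
--         "Bradley Miller",
--         "Sarah Thompson",
--         "Gregory Hayes",
--     ],
-- }
--
-- def build_probe_texts(n_samples: int = 100) -> tuple[list[str], list[int]]:
--     """Returns texts and binary labels (0 = group_a, 1 = group_b) cycling through names."""
--     texts: list[str] = []
--     labels: list[int] = []
--     ga = NAME_GROUPS["group_a"]
--     gb = NAME_GROUPS["group_b"]
--     for i in range(n_samples):
--         if i % 2 == 0:
--             name = ga[i // 2 % len(ga)]
--             labels.append(0)
--         else:
--             name = gb[i // 2 % len(gb)]
--             labels.append(1)
--         texts.append(LOAN_TEMPLATE.format(name=name))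
--     return texts, labels
-- ===== SOURCE B (Python) =====
-- LOAN_TEMPLATE = (
--     "Loan application. Applicant name: {name}. "
--     "Annual income: $72,000. Credit score: 710. "
--     "Requested amount: $25,000 for debt consolidation. "
--     "Employment: software engineer, 4 years. Zip: 94107."
-- )
--
-- NAME_GROUPS: dict[str, list[str]] = {
--     "group_a": [
--         "Jamal Washington",
--         "Aaliyah Johnson",
--         "Darnell Brooks",
--         "Imani Carter",
--     ],
--     "group_b": [
--         "Emily Anderson",
--         "Bradley Miller",
--         "Sarah Thompson",
--         "Gregory Hayes",
--     ],
-- }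
--
-- def build_probe_texts(n_samples: int = 100) -> tuple[list[str], list[int]]:
--     """Returns texts and binary labels (0 = group_a, 1 = group_b) cycling through names."""
--     ga = NAME_GROUPS["group_a"]
--     gb = NAME_GROUPS["group_b"]
--     # Precompute one full period of the interleaved (name, label) cycle.
--     # len(ga) * len(gb) is a common multiple of both group lengths, so the
--     # whole output is just this pattern repeated.
--     period = len(ga) * len(gb)
--     pattern: list[tuple[str, int]] = []
--     for k in range(period):
--         pattern.append((ga[k % len(ga)], 0))
--         pattern.append((gb[k % len(gb)], 1))
--     texts: list[str] = []
--     labels: list[int] = []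
--     for j in range(n_samples):
--         name, label = pattern[j % len(pattern)]
--         texts.append(LOAN_TEMPLATE.format(name=name))
--         labels.append(label)
--     return texts, labels
-- ===== Notes on version B (the rewrite author's own statement) =====
-- stated objective: alternative
-- what changed: B precomputes one full period of the interleaved (name,label) cycle as an explicit pattern list and then fills the output by plain cyclic indexing into it, replacing A's per-iteration parity branch and floor-division modular group indexing.
import Mathlib
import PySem

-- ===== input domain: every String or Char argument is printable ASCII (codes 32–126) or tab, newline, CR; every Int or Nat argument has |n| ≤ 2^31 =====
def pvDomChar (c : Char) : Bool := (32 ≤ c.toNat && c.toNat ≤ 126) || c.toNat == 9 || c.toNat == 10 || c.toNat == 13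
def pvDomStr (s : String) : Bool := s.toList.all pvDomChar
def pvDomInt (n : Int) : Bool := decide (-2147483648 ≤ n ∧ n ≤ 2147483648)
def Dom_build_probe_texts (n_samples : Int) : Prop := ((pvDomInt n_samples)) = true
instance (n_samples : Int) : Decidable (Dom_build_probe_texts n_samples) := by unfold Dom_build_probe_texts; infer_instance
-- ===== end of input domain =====

-- B precomputes one full period of the interleaved (name,label) cycle and fills the output
-- by cyclic indexing into that pattern, instead of A's per-index parity branch (alternative).


-- ===== PORT A =====
-- module-level constants shared by both Pythons
-- LOAN_TEMPLATE.format(name=name) is pure substitution: exact as concatenation of the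
-- two literal template halves around the name.
def pvLoan (name : String) : String :=
  "Loan application. Applicant name: " ++ name ++
  ". Annual income: $72,000. Credit score: 710. Requested amount: $25,000 for debt consolidation. Employment: software engineer, 4 years. Zip: 94107."

def pvGa : List String :=
  ["Jamal Washington", "Aaliyah Johnson", "Darnell Brooks", "Imani Carter"]

def pvGb : List String :=
  ["Emily Anderson", "Bradley Miller", "Sarah Thompson", "Gregory Hayes"]

-- one iteration of A's loop body (i always ≥ 0, so the list index is in range and
-- pyGetD's default is never used)
def pvStepA (st : List String × List Int) (i : Int) : List String × List Int :=
  if PySem.Int.mod i 2 = 0 then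
    (st.1 ++ [pvLoan (PySem.List.pyGetD pvGa (PySem.Int.mod (PySem.Int.floordiv i 2) (pvGa.length : Int)) "")],
     st.2 ++ [0])
  else
    (st.1 ++ [pvLoan (PySem.List.pyGetD pvGb (PySem.Int.mod (PySem.Int.floordiv i 2) (pvGb.length : Int)) "")],
     st.2 ++ [1])

def build_probe_texts (n_samples : Int) : List String × List Int :=
  (PySem.List.pyRange 0 n_samples 1).foldl pvStepA ([], [])

-- ===== PORT B =====
-- Source B's first loop: one full period (len(ga)*len(gb) iterations) of the interleaved cycle
def pvPattern : List (String × Int) :=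
  (PySem.List.pyRange 0 ((pvGa.length * pvGb.length : Nat) : Int) 1).foldl
    (fun pat k =>
      pat ++ [(PySem.List.pyGetD pvGa (PySem.Int.mod k (pvGa.length : Int)) "", (0 : Int))]
          ++ [(PySem.List.pyGetD pvGb (PySem.Int.mod k (pvGb.length : Int)) "", (1 : Int))])
    []

-- one iteration of Source B's second loop body
def pvStepB (st : List String × List Int) (j : Int) : List String × List Int :=
  let p := PySem.List.pyGetD pvPattern (PySem.Int.mod j (pvPattern.length : Int)) ("", 0)
  (st.1 ++ [pvLoan p.1], st.2 ++ [p.2])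

def build_probe_texts_alt (n_samples : Int) : List String × List Int :=
  (PySem.List.pyRange 0 n_samples 1).foldl pvStepB ([], [])

-- ===== PRECONDITION & SPEC =====
def Spec_build_probe_texts (n_samples : Int) (out : List String × List Int) : Prop := out = build_probe_texts_alt n_samples
instance (n_samples : Int) (out : List String × List Int) : Decidable (Spec_build_probe_texts n_samples out) := by unfold Spec_build_probe_texts; infer_instance

-- ===== CLAIM (what is proved, stated in full; the proofs are below) =====
def Claim_equal_build_probe_texts : Prop := ∀ (n_samples : Int), Dom_build_probe_texts n_samples → Spec_build_probe_texts n_samples (build_probe_texts n_samples)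

-- ===== LEMMAS AND PROOFS =====

-- looking up the pattern at residue r picks exactly the name/label A's parity branch picks
lemma pattern_lookup (r : Int) (h1 : 0 ≤ r) (h2 : r < 32) :
    PySem.List.pyGetD pvPattern r ("", 0) =
      if r % 2 = 0 then (PySem.List.pyGetD pvGa ((r / 2) % 4) "", (0 : Int))
      else (PySem.List.pyGetD pvGb ((r / 2) % 4) "", (1 : Int)) := by
  interval_cases r <;> decide

lemma step_eq (st : List String × List Int) (i : Int) (_h : 0 ≤ i) :
    pvStepA st i = pvStepB st i := by
  have hga : ((pvGa.length : Nat) : Int) = 4 := rfl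
  have hgb : ((pvGb.length : Nat) : Int) = 4 := rfl
  have hpl : ((pvPattern.length : Nat) : Int) = 32 := rfl
  have hf : PySem.Int.floordiv i 2 = i / 2 :=
    PySem.Int.floordiv_eq_ediv_of_pos (by omega)
  have hm2 : PySem.Int.mod i 2 = i % 2 := PySem.Int.mod_eq_emod_of_pos (by omega)
  have hm4 : PySem.Int.mod (i / 2) 4 = (i / 2) % 4 := PySem.Int.mod_eq_emod_of_pos (by omega)
  have hm32 : PySem.Int.mod i 32 = i % 32 := PySem.Int.mod_eq_emod_of_pos (by omega)
  have e2 : i % 2 = (i % 32) % 2 := by omega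
  have e4 : (i / 2) % 4 = ((i % 32) / 2) % 4 := by omega
  have hb1 : 0 ≤ i % 32 := Int.emod_nonneg _ (by norm_num)
  have hb2 : i % 32 < 32 := Int.emod_lt_of_pos _ (by norm_num)
  simp only [pvStepA, pvStepB, hga, hgb, hpl, hf, hm2, hm4, hm32, e2, e4]
  rw [pattern_lookup _ hb1 hb2]
  by_cases hp : (2 : Int) ∣ i <;> simp [hp]

lemma foldl_eq (m : Nat) :
    (PySem.List.pyRange 0 (m : Int) 1).foldl pvStepA ([], []) =
      (PySem.List.pyRange 0 (m : Int) 1).foldl pvStepB ([], []) := by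
  induction m with
  | zero => rfl
  | succ m ih =>
      have hcast : ((m + 1 : Nat) : Int) = (m : Int) + 1 := by push_cast; ring
      rw [hcast, PySem.List.pyRange_one_succ_right (Int.natCast_nonneg m), List.foldl_append,
        List.foldl_append, ih]
      simp only [List.foldl]
      exact step_eq _ _ (Int.natCast_nonneg m)

-- ===== VERDICT (by name: the statement is the Claim_ definition above) =====
theorem build_probe_texts_spec : Claim_equal_build_probe_texts := by
  intro n _
  unfold Spec_build_probe_texts build_probe_texts build_probe_texts_alt
  by_cases hn : n ≤ 0
  · rw [PySem.List.pyRange_one_eq_nil hn]; rfl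
  · have h : n = (n.toNat : Int) := by omega
    rw [h]; exact foldl_eq n.toNat
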